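-- pv_equiv track=rewrite | github.com/pypi-data/pypi-mirror-366 | packages/semantic-copycat-miner/semantic_copycat_miner-1.6.3.tar.gz/semantic_copycat_miner-1.6.3/copycatm/parsers/tree_sitter_parser_improved.py | _calculate_line_positions
-- ===== SOURCE A (Python) =====
-- from typing import Any, Optional, Dict, List, Tuple
--
-- def _calculate_line_positions(code: str) -> List[Tuple[int, int]]:
--     """Calculate byte positions for each line in the code."""
--     line_positions = []
--     start = 0
--
--     for line in code.split('\n'):
--         end = start + len(line)
--         line_positions.append((start, end))
--         start = end + 1  # +1 for newline
--
--     return line_positions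
-- ===== SOURCE B (Python) =====
-- from typing import List, Tuple
--
-- def _calculate_line_positions(code: str) -> List[Tuple[int, int]]:
--     """Calculate byte positions for each line in the code."""
--     # Phase 1: index of all line-break boundaries, padded with sentinels.
--     breaks = [-1] + [i for i, c in enumerate(code) if c == '\n'] + [len(code)]
--     # Phase 2: pairwise pass over consecutive boundaries.
--     return [(p + 1, q) for p, q in zip(breaks, breaks[1:])]
-- ===== Notes on version B (the rewrite author's own statement) =====
-- stated objective: alternative
-- what changed: Instead of splitting the string into lines and folding an accumulator of running offsets, B first builds an index table of all newline positions padded with -1 and len(code) sentinels, then emits the spans in a second pairwise zip pass over consecutive boundaries.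
import Mathlib
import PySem

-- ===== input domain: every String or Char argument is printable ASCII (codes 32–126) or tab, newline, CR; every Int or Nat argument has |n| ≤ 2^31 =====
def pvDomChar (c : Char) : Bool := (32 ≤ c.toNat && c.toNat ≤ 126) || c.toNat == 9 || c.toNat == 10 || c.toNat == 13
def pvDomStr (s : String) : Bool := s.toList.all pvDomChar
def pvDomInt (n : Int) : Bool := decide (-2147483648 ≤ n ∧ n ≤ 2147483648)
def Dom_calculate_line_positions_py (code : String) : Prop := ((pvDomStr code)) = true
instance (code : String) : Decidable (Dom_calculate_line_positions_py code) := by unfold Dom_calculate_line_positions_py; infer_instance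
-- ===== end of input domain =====

-- B rebuilds the spans from a padded index table of newline positions with a pairwise zip pass,
-- instead of A's split-into-lines fold with a running offset (alternative decomposition, same cost).

-- ===== PORT A =====
def calculate_line_positions_py (code : String) : List (Int × Int) :=
  -- for line in code.split('\n'): end = start + len(line); append (start, end); start = end + 1
  ((PySem.Chars.splitOn code.toList ['\n']).foldl
    (fun (st : List (Int × Int) × Int) line =>
      let e : Int := st.2 + PySem.Chars.len line
      (st.1 ++ [(st.2, e)], e + 1)) ([], 0)).1

-- ===== PORT B =====
-- breaks = [-1] + [i for i, c in enumerate(code) if c == '\n'] + [len(code)]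
def pvBreaks (code : String) : List Int :=
  [-1] ++ ((PySem.List.enumerate code.toList 0).filter (fun p => p.2 == '\n')).map (·.1)
    ++ [PySem.Str.len code]

-- [(p + 1, q) for p, q in zip(breaks, breaks[1:])]
def calculate_line_positions_py_alt (code : String) : List (Int × Int) :=
  ((pvBreaks code).zip (PySem.List.slice (pvBreaks code) (some 1))).map (fun p => (p.1 + 1, p.2))

-- ===== PRECONDITION & SPEC =====
def Spec_calculate_line_positions_py (code : String) (out : List (Int × Int)) : Prop := out = calculate_line_positions_py_alt code
instance (code : String) (out : List (Int × Int)) : Decidable (Spec_calculate_line_positions_py code out) := by unfold Spec_calculate_line_positions_py; infer_instance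

-- ===== CLAIM (what is proved, stated in full; the proofs are below) =====
def Claim_equal_calculate_line_positions_py : Prop := ∀ (code : String), Dom_calculate_line_positions_py code → Spec_calculate_line_positions_py code (calculate_line_positions_py code)

-- ===== LEMMAS AND PROOFS =====

-- proof-only reference functions
def pvModHead (p : List Char) : List (List Char) → List (List Char)
  | [] => [p]
  | x :: xs => (p ++ x) :: xs

def pvLines : List Char → List (List Char)
  | [] => [[]]
  | c :: cs => if c = '\n' then [] :: pvLines cs else pvModHead [c] (pvLines cs)

def pvF : List (List Char) → Int → List (Int × Int)
  | [], _ => []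
  | l :: ls, s => (s, s + PySem.Chars.len l) :: pvF ls (s + PySem.Chars.len l + 1)

def pvH (b : Int) : List Char → Int → List (Int × Int)
  | [], s => [(b, s)]
  | c :: cs, s => if c = '\n' then (b, s) :: pvH (s + 1) cs (s + 1) else pvH b cs (s + 1)

def pvW (prev : Int) : List Int → Int → List (Int × Int)
  | [], e => [(prev + 1, e)]
  | p :: ps, e => (prev + 1, p) :: pvW p ps e

def pvPatch (b : Int) : List (Int × Int) → List (Int × Int)
  | [] => []
  | (_, e) :: r => (b, e) :: r

def pvNls (cs : List Char) (s : Int) : List Int :=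
  ((PySem.List.enumerate cs s).filter (fun p => p.2 == '\n')).map (·.1)

theorem pvLines_ne_nil (cs : List Char) : pvLines cs ≠ [] := by
  cases cs with
  | nil => simp [pvLines]
  | cons c cs =>
    simp only [pvLines]
    split
    · simp
    · cases h : pvLines cs <;> simp [pvModHead]

theorem pvModHead_pvModHead (p q : List Char) (ls : List (List Char)) :
    pvModHead p (pvModHead q ls) = pvModHead (p ++ q) ls := by
  cases ls <;> simp [pvModHead]

theorem pv_go_spec (fuel : Nat) (l cur : List Char) (acc : List (List Char))
    (h : l.length < fuel) :
    PySem.Chars.splitOn.go ['\n'] fuel l cur acc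
      = acc.reverse ++ pvModHead cur.reverse (pvLines l) := by
  induction fuel generalizing l cur acc with
  | zero => omega
  | succ f ih =>
    cases l with
    | nil => simp [PySem.Chars.splitOn.go, pvLines, pvModHead]
    | cons c rest =>
      by_cases hc : c = '\n'
      · subst hc
        rw [show PySem.Chars.splitOn.go ['\n'] (f + 1) ('\n' :: rest) cur acc
              = PySem.Chars.splitOn.go ['\n'] f rest [] (cur.reverse :: acc) by
            simp [PySem.Chars.splitOn.go, List.isPrefixOf]]
        rw [ih rest [] (cur.reverse :: acc) (by simpa using Nat.lt_of_succ_lt_succ h)]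
        have hne := pvLines_ne_nil rest
        cases hl : pvLines rest with
        | nil => exact absurd hl hne
        | cons x xs => simp [pvLines, pvModHead, hl]
      · rw [show PySem.Chars.splitOn.go ['\n'] (f + 1) (c :: rest) cur acc
              = PySem.Chars.splitOn.go ['\n'] f rest (c :: cur) acc by
            simp only [PySem.Chars.splitOn.go, List.isPrefixOf, Bool.and_true]
            rw [if_neg (by simp [Ne.symm hc])]]
        rw [ih rest (c :: cur) acc (by simpa using Nat.lt_of_succ_lt_succ h)]
        simp [pvLines, hc, pvModHead_pvModHead]

theorem pv_splitOn_eq (cs : List Char) :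
    PySem.Chars.splitOn cs ['\n'] = pvLines cs := by
  rw [show PySem.Chars.splitOn cs ['\n']
        = PySem.Chars.splitOn.go ['\n'] (cs.length + 1) cs [] [] from rfl]
  rw [pv_go_spec _ cs [] [] (by omega)]
  have hne := pvLines_ne_nil cs
  cases hl : pvLines cs with
  | nil => exact absurd hl hne
  | cons x xs => simp [pvModHead]

theorem pv_foldl_spec (ls : List (List Char)) (st : List (Int × Int) × Int) :
    (ls.foldl (fun (st : List (Int × Int) × Int) line =>
        let e : Int := st.2 + PySem.Chars.len line
        (st.1 ++ [(st.2, e)], e + 1)) st).1 = st.1 ++ pvF ls st.2 := by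
  induction ls generalizing st with
  | nil => simp [pvF]
  | cons l ls ih =>
    rw [List.foldl_cons, ih]
    simp [pvF]

theorem pv_A_eq (code : String) :
    calculate_line_positions_py code = pvF (pvLines code.toList) 0 := by
  unfold calculate_line_positions_py
  rw [pv_splitOn_eq, pv_foldl_spec]
  simp

theorem pv_patch_pvF (ls : List (List Char)) (s : Int) (h : ls ≠ []) :
    pvPatch s (pvF ls s) = pvF ls s := by
  cases ls with
  | nil => exact absurd rfl h
  | cons l ls => simp [pvF, pvPatch]

theorem pv_h_eq_patch (cs : List Char) (s b : Int) :
    pvH b cs s = pvPatch b (pvF (pvLines cs) s) := by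
  induction cs generalizing s b with
  | nil => simp [pvH, pvLines, pvF, pvPatch, PySem.Chars.len]
  | cons c cs ih =>
    by_cases hc : c = '\n'
    · subst hc
      simp only [pvH, pvLines]
      rw [ih (s + 1) (s + 1), pv_patch_pvF _ _ (pvLines_ne_nil cs)]
      simp [pvF, pvPatch, PySem.Chars.len]
    · simp only [pvH, pvLines, if_neg hc]
      rw [ih (s + 1) b]
      have hne := pvLines_ne_nil cs
      cases hl : pvLines cs with
      | nil => exact absurd hl hne
      | cons l ls =>
        have harith : s + 1 + PySem.Chars.len l = s + PySem.Chars.len ([c] ++ l) := by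
          simp [PySem.Chars.len]; omega
        simp only [pvModHead, pvF, pvPatch, harith]

theorem pvNls_nil (s : Int) : pvNls [] s = [] := by
  simp [pvNls, PySem.List.enumerate_nil]

theorem pvNls_cons (c : Char) (cs : List Char) (s : Int) :
    pvNls (c :: cs) s = if c = '\n' then s :: pvNls cs (s + 1) else pvNls cs (s + 1) := by
  simp only [pvNls, PySem.List.enumerate_cons, List.filter_cons]
  by_cases hc : c = '\n' <;> simp [hc]

theorem pv_w_eq_h (cs : List Char) (s prev : Int) :
    pvW prev (pvNls cs s) (s + cs.length) = pvH (prev + 1) cs s := by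
  induction cs generalizing s prev with
  | nil => simp [pvNls_nil, pvW, pvH]
  | cons c cs ih =>
    have harith : s + ((c :: cs).length : Int) = (s + 1) + cs.length := by
      simp only [List.length_cons]; push_cast; ring
    by_cases hc : c = '\n'
    · rw [pvNls_cons, if_pos hc, harith]
      simp only [pvW, pvH, if_pos hc]
      rw [ih (s + 1) s]
    · rw [pvNls_cons, if_neg hc, harith]
      simp only [pvH, if_neg hc]
      rw [ih (s + 1) prev]

theorem pv_zip_shape (prev : Int) (ps : List Int) (e : Int) :
    (((prev :: (ps ++ [e])).zip (ps ++ [e])).map (fun p => (p.1 + 1, p.2)))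
      = pvW prev ps e := by
  induction ps generalizing prev with
  | nil => simp [pvW]
  | cons p ps ih => simp only [List.cons_append, List.zip_cons_cons, List.map_cons, pvW, ih]

theorem pv_B_eq (code : String) :
    calculate_line_positions_py_alt code
      = pvW (-1) (pvNls code.toList 0) (code.toList.length : Int) := by
  have hb : pvBreaks code
      = (-1 : Int) :: (pvNls code.toList 0 ++ [(code.toList.length : Int)]) := by
    simp [pvBreaks, pvNls, PySem.Str.len]
  unfold calculate_line_positions_py_alt
  rw [hb, PySem.List.slice_from _ (by norm_num : (0:Int) ≤ 1)]
  simp only [Int.toNat_one, List.drop_succ_cons, List.drop_zero]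
  exact pv_zip_shape (-1) (pvNls code.toList 0) _

-- ===== VERDICT (by name: the statement is the Claim_ definition above) =====
theorem calculate_line_positions_py_spec : Claim_equal_calculate_line_positions_py := by
  intro code _
  unfold Spec_calculate_line_positions_py
  rw [pv_A_eq, pv_B_eq]
  have h9 : pvW (-1) (pvNls code.toList 0) (code.toList.length : Int)
      = pvH 0 code.toList 0 := by
    have h := pv_w_eq_h code.toList 0 (-1)
    norm_num at h
    exact h
  rw [h9, pv_h_eq_patch, pv_patch_pvF _ _ (pvLines_ne_nil _)]
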